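-- pv_equiv track=rewrite | github.com/bssrdf/pyleet | FindtheDerangementofAnArray.py | findDerangementO1Space
-- ===== SOURCE A (Python) =====
-- def findDerangementO1Space(n):
--     # Write your code here
--     #Let f(n) be the number of derangement that can be generated using n integers.
--     # Obviously, f(1) = 0 and f(2) = 1. For n > 2, how to calculate f(n)?
--
--     #Use dynamic programming, where f(n) can be obtained using f(n - 1) and f(n - 2).
--     # If there are n numbers, then the greatest number n can be placed in any
--     # position from 1 to n - 1. Suppose number n is placed in position m
--     # where 1 <= m < n, then number m must be in a position that is not
--     # its original position. If number m is in position n, then the situation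
--     # becomes a derangement of n - 2 remaining numbers, so the number of
--     # derangement is f(n - 2). If number m is not in position n, then for
--     # each number from 1 to n - 1, there is exactly one position that the
--     # number can’t be in. For number m, the one position it can’t be in is
--     # position n. For other numbers like number k where k != m and k < n,
--     # the one position it can’t be in is position k. So the number of derangement
--     # is f(n - 1). In conclusion, if there are n numbers and number n is
--     # placed in position m where 1 <= m < n, then the number of derangement
--     # is f(n - 2) + f(n - 1). Since there are n - 1 possible values for m,
--     # the number of derangement in total is f(n) = (f(n - 2) + f(n - 1)) * (n - 1).
--
--     #For each m such that 1 <= m <= n, after f(m) is calculated, do the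
--     # modulo operation. Finally, return f(n).
--
--     # 设定状态: f[i] 表示含i个元素的排列能生成的错乱的数量
--
--     # 状态转移方程: f[i] = (i - 1) * (f[i-1] + f[i-2])
--
--     # 边界: f[1] = 0, f[2] = 1
--
--     # 对于 f[n] 的计算, 假定把 n 放到了第 k 个位置:
--
--     # 这时如果把 k 放到了第 n 个位置, 那么剩下的 n-2 个元素的错乱即为 f[n-2]
--     # 如果把 k 放到了其他位置, 也就是说 k 不能放到 n, 与 n-1 个元素的错乱中 "k不能放到k"
--     # 是等价的, 也就是说, 这时是 f[n-1]
--     # k一共有 n-1 个选择, 故 f[n] = (i - 1) * (f[n-1] + f[n-2])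
--     if n <= 3: return n - 1
--     MODULO = 1000000007
--     dp0 = 0
--     dp1 = 1
--     for i in range(2, n):
--         dp = (dp0 + dp1) * i % MODULO
--         dp0, dp1 = dp1, dp
--     return dp1
-- ===== SOURCE B (Python) =====
-- def findDerangementO1Space(n):
--     # first-order recurrence first-order recurrence with an alternating ±1 term, single running value
--     if n <= 3:
--         return n - 1
--     MOD = 1000000007
--     d = 1
--     for i in range(1, n + 1):
--         d = (i * d + (1 if i % 2 == 0 else -1)) % MOD
--     return d
-- ===== Notes on version B (the rewrite author's own statement) =====
-- stated objective: alternative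
-- what changed: Replaces A's second-order derangement recurrence, which carries two running values, with the first-order recurrence that carries a single running value plus an alternating sign.
import Mathlib
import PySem

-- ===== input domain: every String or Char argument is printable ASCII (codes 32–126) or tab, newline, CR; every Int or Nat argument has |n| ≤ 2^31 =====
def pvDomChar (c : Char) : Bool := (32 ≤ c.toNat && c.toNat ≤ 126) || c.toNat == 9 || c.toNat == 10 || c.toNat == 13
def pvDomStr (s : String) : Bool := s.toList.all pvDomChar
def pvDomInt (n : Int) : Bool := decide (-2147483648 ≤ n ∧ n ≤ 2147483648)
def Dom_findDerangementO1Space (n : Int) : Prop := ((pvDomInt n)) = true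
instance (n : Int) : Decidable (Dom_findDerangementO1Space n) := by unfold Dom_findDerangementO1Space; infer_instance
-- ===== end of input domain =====

-- B replaces A's second-order derangement recurrence (two running values) by the
-- first-order recurrence (one running value plus an alternating sign);
-- same linear cost, different recurrence and maintained state (objective: alternative).

-- ===== PORT A =====
def findDerangementO1Space (n : Int) : Int :=
  if n ≤ 3 then n - 1
  else
    ((PySem.List.pyRange 2 n 1).foldl
      (fun (p : Int × Int) i => (p.2, PySem.Int.mod ((p.1 + p.2) * i) 1000000007))
      (0, 1)).2

-- ===== PORT B =====
def findDerangementO1Space_alt (n : Int) : Int :=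
  if n ≤ 3 then n - 1
  else
    (PySem.List.pyRange 1 (n + 1) 1).foldl
      (fun d i => PySem.Int.mod (i * d + (if PySem.Int.mod i 2 = 0 then 1 else -1)) 1000000007)
      1

-- ===== PRECONDITION & SPEC =====
def Spec_findDerangementO1Space (n : Int) (out : Int) : Prop := out = findDerangementO1Space_alt n
instance (n : Int) (out : Int) : Decidable (Spec_findDerangementO1Space n out) := by unfold Spec_findDerangementO1Space; infer_instance

-- ===== CLAIM (what is proved, stated in full; the proofs are below) =====
def Claim_equal_findDerangementO1Space : Prop := ∀ (n : Int), Dom_findDerangementO1Space n → Spec_findDerangementO1Space n (findDerangementO1Space n)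

-- ===== LEMMAS AND PROOFS =====

-- alternating sign, exactly as B's lambda computes it
def pvSgn (i : Int) : Int := if PySem.Int.mod i 2 = 0 then 1 else -1

lemma pvSgn_succ (i : Int) : pvSgn (i + 1) = -pvSgn i := by
  unfold pvSgn
  rw [PySem.Int.mod_eq_emod_of_pos (by norm_num), PySem.Int.mod_eq_emod_of_pos (by norm_num)]
  rcases Int.emod_two_eq i with h | h <;> simp [h] <;> omega

-- the joint loop invariant: after the ranges up to m = 3+k, B's single value equals A's first
-- component, and A's second component is reduced and satisfies B's next-step recurrence
lemma pvInv (k : Nat) :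
    ((PySem.List.pyRange 1 (3 + (k : Int)) 1).foldl
        (fun d i => PySem.Int.mod (i * d + (if PySem.Int.mod i 2 = 0 then 1 else -1)) 1000000007) 1
      = ((PySem.List.pyRange 2 (3 + (k : Int)) 1).foldl
          (fun (p : Int × Int) i => (p.2, PySem.Int.mod ((p.1 + p.2) * i) 1000000007)) (0, 1)).1)
  ∧ (((PySem.List.pyRange 2 (3 + (k : Int)) 1).foldl
          (fun (p : Int × Int) i => (p.2, PySem.Int.mod ((p.1 + p.2) * i) 1000000007)) (0, 1)).2 % 1000000007
      = ((PySem.List.pyRange 2 (3 + (k : Int)) 1).foldl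
          (fun (p : Int × Int) i => (p.2, PySem.Int.mod ((p.1 + p.2) * i) 1000000007)) (0, 1)).2)
  ∧ (((PySem.List.pyRange 2 (3 + (k : Int)) 1).foldl
          (fun (p : Int × Int) i => (p.2, PySem.Int.mod ((p.1 + p.2) * i) 1000000007)) (0, 1)).2
      = ((3 + (k : Int)) * ((PySem.List.pyRange 2 (3 + (k : Int)) 1).foldl
          (fun (p : Int × Int) i => (p.2, PySem.Int.mod ((p.1 + p.2) * i) 1000000007)) (0, 1)).1
          + pvSgn (3 + (k : Int))) % 1000000007) := by
  induction k with
  | zero => decide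
  | succ k ih =>
    obtain ⟨hb, hy2, hy3⟩ := ih
    have hm1 : (1 : Int) ≤ 3 + (k : Int) := by omega
    have hm2 : (2 : Int) ≤ 3 + (k : Int) := by omega
    have hcast : (3 + ((k + 1 : Nat) : Int)) = (3 + (k : Int)) + 1 := by push_cast; ring
    rw [hcast, PySem.List.pyRange_one_succ_right hm1, PySem.List.pyRange_one_succ_right hm2,
        List.foldl_append, List.foldl_append]
    set m : Int := 3 + (k : Int) with hm
    set q := (PySem.List.pyRange 2 m 1).foldl
      (fun (p : Int × Int) i => (p.2, PySem.Int.mod ((p.1 + p.2) * i) 1000000007)) (0, 1) with hq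
    set b := (PySem.List.pyRange 1 m 1).foldl
      (fun d i => PySem.Int.mod (i * d + (if PySem.Int.mod i 2 = 0 then 1 else -1)) 1000000007) 1 with hbdef
    simp only [List.foldl_cons, List.foldl_nil]
    refine ⟨?_, ?_, ?_⟩
    · show PySem.Int.mod (m * b + (if PySem.Int.mod m 2 = 0 then 1 else -1)) 1000000007 = q.2
      rw [hb, PySem.Int.mod_eq_emod_of_pos (by norm_num)]
      have hs : (if PySem.Int.mod m 2 = 0 then (1 : Int) else -1) = pvSgn m := rfl
      rw [hs]
      exact hy3.symm
    · show PySem.Int.mod ((q.1 + q.2) * m) 1000000007 % 1000000007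
        = PySem.Int.mod ((q.1 + q.2) * m) 1000000007
      rw [PySem.Int.mod_eq_emod_of_pos (by norm_num)]
      exact Int.emod_emod_of_dvd _ dvd_rfl
    · show PySem.Int.mod ((q.1 + q.2) * m) 1000000007
        = ((m + 1) * q.2 + pvSgn (m + 1)) % 1000000007
      rw [PySem.Int.mod_eq_emod_of_pos (by norm_num), pvSgn_succ]
      have h1 : Int.ModEq 1000000007 q.2 (m * q.1 + pvSgn m) := by
        show q.2 % 1000000007 = (m * q.1 + pvSgn m) % 1000000007
        rw [hy2, hy3]
      have h2 : Int.ModEq 1000000007 ((m + 1) * q.2 + -pvSgn m)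
          ((m + 1) * (m * q.1 + pvSgn m) + -pvSgn m) := (h1.mul_left (m + 1)).add_right _
      have h3 : (m + 1) * (m * q.1 + pvSgn m) + -pvSgn m
          = (q.1 + (m * q.1 + pvSgn m)) * m := by ring
      have h4 : Int.ModEq 1000000007 ((q.1 + q.2) * m)
          ((q.1 + (m * q.1 + pvSgn m)) * m) := ((Int.ModEq.refl q.1).add h1).mul_right m
      exact h4.trans (h3 ▸ h2.symm)

-- ===== VERDICT (by name: the statement is the Claim_ definition above) =====
theorem findDerangementO1Space_spec : Claim_equal_findDerangementO1Space := by
  intro n _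
  unfold Spec_findDerangementO1Space findDerangementO1Space findDerangementO1Space_alt
  by_cases hn : n ≤ 3
  · simp [hn]
  · simp only [if_neg hn]
    have hk : n = 3 + ((n - 3).toNat : Int) := by omega
    obtain ⟨hb, hy2, hy3⟩ := pvInv (n - 3).toNat
    rw [← hk] at hb hy2 hy3
    rw [PySem.List.pyRange_one_succ_right (by omega : (1 : Int) ≤ n), List.foldl_append,
        List.foldl_cons, List.foldl_nil, hb, PySem.Int.mod_eq_emod_of_pos (by norm_num)]
    have hs : (if PySem.Int.mod n 2 = 0 then (1 : Int) else -1) = pvSgn n := rfl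
    rw [hs]
    exact hy3
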